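-- pv_equiv track=rewrite | github.com/peterpei666/leetcode_python | 3726. Remove Zeros in Decimal Representation.py | removeZeros
-- ===== SOURCE A (Python) =====
-- def removeZeros(n: int) -> int:
--     ans, temp = 0, 1
--     while n:
--         if n % 10:
--             ans += (n % 10) * temp
--             temp *= 10
--         n //= 10
--     return ans
-- ===== SOURCE B (Python) =====
-- def removeZeros(n: int) -> int:
--     # Direct recursion: strip the last digit, solve the prefix, reattach the digit if nonzero.
--     if n == 0:
--         return 0
--     head = removeZeros(n // 10)
--     d = n % 10
--     return head * 10 + d if d else head
-- ===== Notes on version B (the rewrite author's own statement) =====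
-- stated objective: simpler
-- what changed: Replaces A's iterative least-significant-first accumulation with a positional multiplier (ans, temp state pair) by a direct structural recursion that rebuilds the number most-significant-first with head*10+d, eliminating the multiplier state.
import Mathlib
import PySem

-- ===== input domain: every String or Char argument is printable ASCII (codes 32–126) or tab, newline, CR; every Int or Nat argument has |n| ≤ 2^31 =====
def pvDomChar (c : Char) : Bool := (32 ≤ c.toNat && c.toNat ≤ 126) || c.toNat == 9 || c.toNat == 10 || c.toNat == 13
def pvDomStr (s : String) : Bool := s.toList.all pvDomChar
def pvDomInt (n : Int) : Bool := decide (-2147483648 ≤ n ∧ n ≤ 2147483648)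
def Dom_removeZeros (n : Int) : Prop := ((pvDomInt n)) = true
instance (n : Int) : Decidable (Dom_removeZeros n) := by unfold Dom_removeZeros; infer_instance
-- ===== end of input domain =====

-- ===== PORT A =====
-- B replaces A's (ans, temp) accumulation loop by direct most-significant-first recursion (objective: simpler).
-- A's 'while n:' loop never terminates for n < 0 (n //= 10 stabilises at -1), so Pre_ restricts to 0 ≤ n;
-- on 0 ≤ n the guard 'n != 0' is rendered as '0 < n' (equivalent there) so the port is total.
theorem pvFloordiv10_toNat_lt (n : Int) (h : 0 < n) :
    (PySem.Int.floordiv n 10).toNat < n.toNat := by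
  rw [PySem.Int.floordiv_eq_ediv_of_pos (by norm_num)]
  omega

def removeZerosGo (n ans temp : Int) : Int :=
  if h : 0 < n then
    if PySem.Int.mod n 10 ≠ 0 then
      removeZerosGo (PySem.Int.floordiv n 10) (ans + PySem.Int.mod n 10 * temp) (temp * 10)
    else
      removeZerosGo (PySem.Int.floordiv n 10) ans temp
  else ans
termination_by n.toNat
decreasing_by all_goals exact pvFloordiv10_toNat_lt n h

def removeZeros (n : Int) : Int := removeZerosGo n 0 1

-- ===== PORT B =====
-- Python B's recursion likewise only reaches its base case for 0 ≤ n; guard '0 < n' is exact there.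
def removeZeros_alt (n : Int) : Int :=
  if h : 0 < n then
    let head := removeZeros_alt (PySem.Int.floordiv n 10)
    let d := PySem.Int.mod n 10
    if d = 0 then head else head * 10 + d
  else 0
termination_by n.toNat
decreasing_by exact pvFloordiv10_toNat_lt n h

-- ===== PRECONDITION & SPEC =====
-- Pre_ excludes n < 0, on which Python A's while-loop never terminates (n //= 10 stabilises at -1).
def Pre_removeZeros (n : Int) : Prop := 0 ≤ n
instance (n : Int) : Decidable (Pre_removeZeros n) := by unfold Pre_removeZeros; infer_instance
def pvWitness_removeZeros : Int := (105)
def Spec_removeZeros (n : Int) (out : Int) : Prop := out = removeZeros_alt n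
instance (n : Int) (out : Int) : Decidable (Spec_removeZeros n out) := by unfold Spec_removeZeros; infer_instance

-- ===== CLAIM (what is proved, stated in full; the proofs are below) =====
def Claim_equal_removeZeros : Prop := ∀ (n : Int), Dom_removeZeros n → Pre_removeZeros n → Spec_removeZeros n (removeZeros n)

-- ===== LEMMAS AND PROOFS =====
-- Loop invariant: the (ans, temp) loop computes ans + temp * (the recursive result).
theorem removeZerosGo_eq (k : Nat) :
    ∀ (n : Int), n.toNat = k → 0 ≤ n → ∀ (ans temp : Int),
      removeZerosGo n ans temp = ans + temp * removeZeros_alt n := by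
  induction k using Nat.strong_induction_on with
  | _ k ih =>
    intro n hk hn ans temp
    rw [removeZerosGo, removeZeros_alt]
    by_cases h : 0 < n
    · have hdpos : (0 : Int) < 10 := by norm_num
      have hfd : PySem.Int.floordiv n 10 = n / 10 := PySem.Int.floordiv_eq_ediv_of_pos hdpos
      have hfd0 : 0 ≤ PySem.Int.floordiv n 10 := by rw [hfd]; exact Int.ediv_nonneg hn (by norm_num)
      have hlt : (PySem.Int.floordiv n 10).toNat < k := hk ▸ pvFloordiv10_toNat_lt n h
      have ihn := ih _ hlt (PySem.Int.floordiv n 10) rfl hfd0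
      simp only [h, dif_pos]
      by_cases hd : PySem.Int.mod n 10 = 0
      · simp only [hd, ne_eq, not_true_eq_false, if_false, ite_true, ihn]
      · simp only [hd, ne_eq, not_false_eq_true, if_true, ite_false, ihn]
        ring
    · simp only [h, dif_neg, not_false_eq_true]
      ring

-- ===== VERDICT (by name: the statement is the Claim_ definition above) =====
theorem removeZeros_spec : Claim_equal_removeZeros := by
  intro n _ hn
  unfold Spec_removeZeros removeZeros
  rw [removeZerosGo_eq n.toNat n rfl hn 0 1]
  ring
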